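-- pv_equiv track=rewrite | github.com/gajekish/comp110-23f-workspace | exercises/ex06/dictionary.py | update_attendance
-- ===== SOURCE A (Python) =====
-- def update_attendance(input_dict: dict[str, list[str]], day: str, student: str) -> dict[str, list[str]]:
--     """Returns a mutated input_dict with days of the week as keys and a list of students in attendance as values."""
--     student_list: list[str] = []
--     for elem in input_dict:
--         if (elem == day):
--             value = input_dict[elem]
--             value.append(student)
--     if (day not in input_dict):
--         student_list.append(student)
--         input_dict[day] = student_list
--     return input_dict
-- ===== SOURCE B (Python) =====
-- def update_attendance(input_dict: dict[str, list[str]], day: str, student: str) -> dict[str, list[str]]: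
--     """Returns a mutated input_dict with days of the week as keys and a list of students in attendance as values."""
--     if day in input_dict:
--         input_dict[day].append(student)
--     else:
--         input_dict[day] = [student]
--     return input_dict
-- ===== Notes on version B (the rewrite author's own statement) =====
-- stated objective: simpler
-- what changed: Replaced the scan over all keys plus a separate membership pass with a single direct membership test that either appends to the existing day's list or creates the new entry.
import Mathlib
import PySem

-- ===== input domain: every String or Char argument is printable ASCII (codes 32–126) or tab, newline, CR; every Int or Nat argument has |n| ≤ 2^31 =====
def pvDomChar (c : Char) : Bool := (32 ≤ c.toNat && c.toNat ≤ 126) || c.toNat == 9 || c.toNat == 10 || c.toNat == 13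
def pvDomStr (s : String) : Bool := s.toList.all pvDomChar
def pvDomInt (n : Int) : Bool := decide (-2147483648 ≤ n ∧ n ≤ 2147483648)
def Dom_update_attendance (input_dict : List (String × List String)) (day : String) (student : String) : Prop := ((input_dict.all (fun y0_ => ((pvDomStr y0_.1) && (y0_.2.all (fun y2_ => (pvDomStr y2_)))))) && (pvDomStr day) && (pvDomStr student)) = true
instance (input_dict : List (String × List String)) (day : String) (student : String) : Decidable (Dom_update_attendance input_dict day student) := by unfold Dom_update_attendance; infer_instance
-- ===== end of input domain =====

-- B replaces A's scan over all keys plus a second membership pass with one direct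
-- membership test that either appends to the existing entry or creates the new one (simpler).
-- A mutates input_dict in place in Python; the equivalence proved here is about the return value.


-- ===== PORT A =====
-- `value = input_dict[elem]; value.append(student)`: in-place append to the value of the
-- FIRST entry whose key is `elem` (dict lookup = first match in the association list).
def pvAppendAtKey (d : List (String × List String)) (k : String) (s : String) : List (String × List String) :=
  match d with
  | [] => []
  | (k', v) :: rest =>
      if k' == k then (k', v ++ [s]) :: rest else (k', v) :: pvAppendAtKey rest k s

-- A: loop over the keys, appending whenever the key equals `day`; then a separate
-- membership test appends the fresh entry (day, [student]) if the key is absent.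
def update_attendance (input_dict : List (String × List String)) (day : String) (student : String) : List (String × List String) :=
  let d1 := (input_dict.map Prod.fst).foldl
    (fun acc elem => if elem == day then pvAppendAtKey acc elem student else acc) input_dict
  if d1.any (fun p => p.1 == day) then d1 else d1 ++ [(day, [student])]

-- ===== PORT B =====
-- B: one direct pass to the first entry keyed `day` (append there), or append a new
-- entry at the end if no entry has that key.
def update_attendance_alt (input_dict : List (String × List String)) (day : String) (student : String) : List (String × List String) :=
  match input_dict with
  | [] => [(day, [student])]
  | (k, v) :: rest =>
      if k == day then (k, v ++ [student]) :: rest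
      else (k, v) :: update_attendance_alt rest day student

-- ===== PRECONDITION & SPEC =====
-- Pre_ excludes association lists with duplicate keys: those do not represent any Python
-- dict (A's parameter is a dict, whose keys are necessarily distinct).
def Pre_update_attendance (input_dict : List (String × List String)) (day : String) (student : String) : Prop :=
  (input_dict.map Prod.fst).Nodup
instance (input_dict : List (String × List String)) (day : String) (student : String) : Decidable (Pre_update_attendance input_dict day student) := by unfold Pre_update_attendance; infer_instance
def pvWitness_update_attendance : (List (String × List String)) × String × String :=
  ([("Mon", ["ann"]), ("Tue", [])], "Mon", "bob")

def Spec_update_attendance (input_dict : List (String × List String)) (day : String) (student : String) (out : List (String × List String)) : Prop := out = update_attendance_alt input_dict day student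
instance (input_dict : List (String × List String)) (day : String) (student : String) (out : List (String × List String)) : Decidable (Spec_update_attendance input_dict day student out) := by unfold Spec_update_attendance; infer_instance

-- ===== CLAIM (what is proved, stated in full; the proofs are below) =====
def Claim_equal_update_attendance : Prop := ∀ (input_dict : List (String × List String)) (day : String) (student : String), Dom_update_attendance input_dict day student → Pre_update_attendance input_dict day student → Spec_update_attendance input_dict day student (update_attendance input_dict day student)

-- ===== LEMMAS AND PROOFS =====

-- pvAppendAtKey preserves the key list
theorem pvAppendAtKey_keys (d : List (String × List String)) (k s : String) :
    (pvAppendAtKey d k s).map Prod.fst = d.map Prod.fst := by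
  induction d with
  | nil => rfl
  | cons p rest ih =>
      obtain ⟨k', v⟩ := p
      by_cases h : k' = k <;> simp [pvAppendAtKey, h, ih]

-- the A-side fold applies pvAppendAtKey once per occurrence of day in the key list
theorem foldl_appendAtKey (ks : List String) (day s : String)
    (acc : List (String × List String)) :
    ks.foldl (fun acc elem => if elem == day then pvAppendAtKey acc elem s else acc) acc
      = (fun d => pvAppendAtKey d day s)^[ks.count day] acc := by
  induction ks generalizing acc with
  | nil => rfl
  | cons k rest ih =>
      by_cases h : k = day
      · subst h
        simp only [List.foldl_cons, beq_self_eq_true, if_pos, List.count_cons_self, ih,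
          Function.iterate_succ_apply]
      · rw [List.foldl_cons, if_neg (by simp [h]), ih]
        simp [h]

-- B equals "append new entry at the end" when day is not among the keys
theorem alt_of_not_mem (d : List (String × List String)) (day s : String)
    (h : day ∉ d.map Prod.fst) : update_attendance_alt d day s = d ++ [(day, [s])] := by
  induction d with
  | nil => rfl
  | cons p rest ih =>
      obtain ⟨k', v⟩ := p
      simp only [List.map_cons, List.mem_cons, not_or] at h
      simp [update_attendance_alt, beq_iff_eq, Ne.symm h.1, ih h.2]

-- B equals pvAppendAtKey when day is among the keys
theorem alt_of_mem (d : List (String × List String)) (day s : String)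
    (h : day ∈ d.map Prod.fst) : update_attendance_alt d day s = pvAppendAtKey d day s := by
  induction d with
  | nil => simp at h
  | cons p rest ih =>
      obtain ⟨k', v⟩ := p
      by_cases hk : k' = day
      · simp [update_attendance_alt, pvAppendAtKey, hk]
      · simp only [List.map_cons, List.mem_cons] at h
        have h' : day ∈ rest.map Prod.fst := h.resolve_left (fun hc => hk hc.symm)
        simp [update_attendance_alt, pvAppendAtKey, hk, ih h']

-- the membership test on a list: any (·.1 == day) ↔ day ∈ keys
theorem any_key_iff (d : List (String × List String)) (day : String) :
    d.any (fun p => p.1 == day) = true ↔ day ∈ d.map Prod.fst := by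
  constructor
  · intro h
    obtain ⟨p, hp, he⟩ := List.any_eq_true.mp h
    exact List.mem_map.mpr ⟨p, hp, (beq_iff_eq.mp he)⟩
  · intro h
    obtain ⟨p, hp, he⟩ := List.mem_map.mp h
    exact List.any_eq_true.mpr ⟨p, hp, beq_iff_eq.mpr he⟩

-- ===== VERDICT (by name: the statement is the Claim_ definition above) =====
theorem update_attendance_spec : Claim_equal_update_attendance := by
  intro d day s _ hpre
  unfold Spec_update_attendance update_attendance
  simp only [foldl_appendAtKey]
  by_cases hmem : day ∈ d.map Prod.fst
  · have hc : (d.map Prod.fst).count day = 1 :=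
      List.count_eq_one_of_mem hpre hmem
    have hd1 : (fun d => pvAppendAtKey d day s)^[(d.map Prod.fst).count day] d
        = pvAppendAtKey d day s := by
      rw [hc]; rfl
    rw [hd1]
    have hkeys : (pvAppendAtKey d day s).map Prod.fst = d.map Prod.fst :=
      pvAppendAtKey_keys d day s
    have : (pvAppendAtKey d day s).any (fun p => p.1 == day) = true := by
      rw [any_key_iff, hkeys]; exact hmem
    rw [if_pos this, alt_of_mem d day s hmem]
  · have hc : (d.map Prod.fst).count day = 0 := List.count_eq_zero.mpr hmem
    rw [hc]
    simp only [Function.iterate_zero, id_eq]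
    have : ¬ d.any (fun p => p.1 == day) = true := by
      rw [any_key_iff]; exact hmem
    rw [if_neg this, alt_of_not_mem d day s hmem]
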